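-- pv_equiv track=rewrite | github.com/PaddyCox/project-euler | problem_106/p_106.py | itertools_sum_check
-- ===== SOURCE A (Python) =====
-- import itertools
--
-- def itertools_sum_check(list_1):
--     list_1.sort()
--     number_items = len(list_1)
--     set_list = set(list_1)
--
--     if len(set_list) != number_items:
--         return False
--
--     check_up_to = number_items // 2
--     lower_half = (number_items + 1) // 2
--     large_sum = sum(list_1[0:lower_half])
--     small_sum = sum(list_1[:(-lower_half):-1])
--
--     if large_sum <= small_sum:
--         return False
--
--     subset_sum = set()
--
--     for i in range(1, check_up_to + 1):
--         i_combos = itertools.combinations(list_1, i)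
--         for c_i in i_combos:
--             sum_c = sum(c_i)
--             if sum_c in subset_sum:
--                 return False
--             subset_sum.add(sum_c)
--     return True
-- ===== SOURCE B (Python) =====
-- def itertools_sum_check(list_1):
--     list_1.sort()
--     number_items = len(list_1)
--     if len(set(list_1)) != number_items:
--         return False
--
--     check_up_to = number_items // 2
--     lower_half = (number_items + 1) // 2
--     large_sum = sum(list_1[0:lower_half])
--     small_sum = sum(list_1[:(-lower_half):-1])
--     if large_sum <= small_sum:
--         return False
--
--     # dp[k]: sum -> number of size-k subsets with that sum (k = 0..check_up_to)
--     dp = [{0: 1}] + [{} for _ in range(check_up_to)]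
--     for x in list_1:
--         new_tables = []
--         for prev, cur in zip(dp, dp[1:]):
--             merged = dict(cur)
--             for s, c in prev.items():
--                 merged[s + x] = merged.get(s + x, 0) + c
--             new_tables.append(merged)
--         dp = [dp[0]] + new_tables
--
--     counts = {}
--     for table in dp[1:]:
--         for s, c in table.items():
--             counts[s] = counts.get(s, 0) + c
--     return not any(c > 1 for c in counts.values())
-- ===== Notes on version B (the rewrite author's own statement) =====
-- stated objective: alternative
-- what changed: B keeps A's sort/duplicate/half-sum guards but replaces the per-size itertools.combinations enumeration with an early-exit seen-set by a size-indexed subset-sum dynamic programme that counts, per reachable sum, how many subsets of size 1..n//2 produce it, returning False iff some sum has multiplicity > 1.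
import Mathlib
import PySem

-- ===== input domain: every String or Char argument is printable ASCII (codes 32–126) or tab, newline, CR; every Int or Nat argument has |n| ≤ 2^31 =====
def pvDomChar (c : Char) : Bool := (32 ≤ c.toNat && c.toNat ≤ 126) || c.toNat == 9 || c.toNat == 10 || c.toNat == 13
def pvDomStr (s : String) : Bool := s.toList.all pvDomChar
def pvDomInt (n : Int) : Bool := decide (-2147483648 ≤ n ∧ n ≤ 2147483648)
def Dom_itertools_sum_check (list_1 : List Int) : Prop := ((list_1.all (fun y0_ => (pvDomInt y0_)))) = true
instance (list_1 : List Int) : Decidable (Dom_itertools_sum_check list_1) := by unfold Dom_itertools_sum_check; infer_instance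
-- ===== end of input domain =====

-- B replaces A's per-size itertools.combinations enumeration with a size-indexed subset-sum DP
-- that counts multiplicities of each reachable sum (objective: alternative decomposition; return
-- value only — both A and B sort list_1 in place, a side effect the caller can observe).

-- ===== PORT A =====
-- itertools.combinations(l, k) in itertools' order (subsets using the head come first)
def combosA (k : Nat) (l : List Int) : List (List Int) :=
  match k, l with
  | 0, _ => [[]]
  | _ + 1, [] => []
  | k' + 1, x :: t => ((combosA k' t).map (fun c => x :: c)) ++ combosA (k' + 1) t
termination_by (l.length, k)

-- the inner 'for c_i in i_combos' loop: none models the early 'return False'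
def innerA (cs : List (List Int)) (seen : PySem.Set Int) : Option (PySem.Set Int) :=
  match cs with
  | [] => some seen
  | c :: rest =>
    let sum_c := c.sum
    if PySem.Set.contains seen sum_c then none
    else innerA rest (PySem.Set.add seen sum_c)

-- the outer 'for i in range(1, check_up_to + 1)' loop
def outerA (l : List Int) (is : List Int) (seen : PySem.Set Int) : Bool :=
  match is with
  | [] => true
  | i :: rest =>
    match innerA (combosA i.toNat l) seen with   -- i ∈ range(1, …) is positive, so i.toNat is exact
    | none => false
    | some seen' => outerA l rest seen'

def itertools_sum_check (list_1 : List Int) : Bool :=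
  let l := PySem.List.sorted list_1 (fun x => x) false
  let number_items : Int := PySem.List.len l
  let set_list := PySem.Set.ofList l
  if (PySem.Set.len set_list : Int) ≠ number_items then false
  else
    let check_up_to := PySem.Int.floordiv number_items 2
    let lower_half := PySem.Int.floordiv (number_items + 1) 2
    let large_sum := (PySem.List.slice l (some 0) (some lower_half)).sum
    -- step -1 ≠ 0, so slice? is always some; .getD [] only unwraps it
    let small_sum := ((PySem.List.slice? l none (some (-lower_half)) (-1)).getD []).sum
    if large_sum ≤ small_sum then false
    else outerA l (PySem.List.pyRange 1 (check_up_to + 1) 1) PySem.Set.empty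

-- ===== PORT B =====
-- merged = dict(cur); for s, c in prev.items(): merged[s+x] = merged.get(s+x, 0) + c
def mergeB (prev cur : PySem.Dict Int Int) (x : Int) : PySem.Dict Int Int :=
  prev.items.foldl (fun m sc => m.insert (sc.1 + x) (m.getD (sc.1 + x) 0 + sc.2)) cur

-- dp = [dp[0]] + [merge(prev, cur, x) for prev, cur in zip(dp, dp[1:])]
def stepB (dp : List (PySem.Dict Int Int)) (x : Int) : List (PySem.Dict Int Int) :=
  match dp with
  | [] => []
  | d0 :: _ => d0 :: ((dp.zip dp.tail).map (fun pc => mergeB pc.1 pc.2 x))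

def itertools_sum_check_alt (list_1 : List Int) : Bool :=
  let l := PySem.List.sorted list_1 (fun x => x) false
  let number_items : Int := PySem.List.len l
  if (PySem.Set.len (PySem.Set.ofList l) : Int) ≠ number_items then false
  else
    let check_up_to := PySem.Int.floordiv number_items 2
    let lower_half := PySem.Int.floordiv (number_items + 1) 2
    let large_sum := (PySem.List.slice l (some 0) (some lower_half)).sum
    let small_sum := ((PySem.List.slice? l none (some (-lower_half)) (-1)).getD []).sum
    if large_sum ≤ small_sum then false
    else
      let dp0 : List (PySem.Dict Int Int) :=
        (PySem.Dict.empty.insert 0 1) :: List.replicate check_up_to.toNat PySem.Dict.empty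
      let dp := l.foldl stepB dp0
      let counts := dp.tail.foldl
        (fun acc t => t.items.foldl (fun a sc => a.insert sc.1 (a.getD sc.1 0 + sc.2)) acc)
        PySem.Dict.empty
      !(counts.values.any (fun c => c > 1))

-- ===== PRECONDITION & SPEC =====
def Spec_itertools_sum_check (list_1 : List Int) (out : Bool) : Prop := out = itertools_sum_check_alt list_1
instance (list_1 : List Int) (out : Bool) : Decidable (Spec_itertools_sum_check list_1 out) := by unfold Spec_itertools_sum_check; infer_instance

-- ===== CLAIM (what is proved, stated in full; the proofs are below) =====
def Claim_equal_itertools_sum_check : Prop := ∀ (list_1 : List Int), Dom_itertools_sum_check list_1 → Spec_itertools_sum_check list_1 (itertools_sum_check list_1)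

-- ===== LEMMAS AND PROOFS =====

-- sums of all size-k combinations of the pool
def sumsC (k : Nat) (l : List Int) : List Int := (combosA k l).map List.sum

theorem sumsC_zero (l : List Int) : sumsC 0 l = [0] := by
  simp [sumsC, combosA]

theorem sumsC_nil_succ (k : Nat) : sumsC (k + 1) [] = [] := by
  simp [sumsC, combosA]

theorem sumsC_cons_succ (k : Nat) (y : Int) (t : List Int) :
    sumsC (k + 1) (y :: t) = (sumsC k t).map (fun z => y + z) ++ sumsC (k + 1) t := by
  simp only [sumsC, combosA, List.map_append, List.map_map]
  rfl

theorem count_map_add (zs : List Int) (y s : Int) :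
    (zs.map (fun z => y + z)).count s = zs.count (s - y) := by
  have h : s = y + (s - y) := by ring
  rw [h, List.count_map_of_injective _ _ (fun a b hab => by omega)]
  congr 1; omega

theorem count_singleton_shift (s t x : Int) : List.count s [t] = List.count (s - x) [t - x] := by
  by_cases h : s = t
  · rw [h]
    simp
  · rw [List.count_eq_zero_of_not_mem (by simp [h]),
        List.count_eq_zero_of_not_mem (by simp; omega)]

-- appending one element to the pool: the subset-sum count recurrence
theorem count_sumsC_append (l : List Int) (x s : Int) (k : Nat) :
    (sumsC (k + 1) (l ++ [x])).count s
      = (sumsC (k + 1) l).count s + (sumsC k l).count (s - x) := by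
  induction l generalizing k s with
  | nil =>
    cases k with
    | zero =>
      rw [List.nil_append]
      rw [show sumsC 1 [x] = (sumsC 0 []).map (fun z => x + z) ++ sumsC 1 [] from sumsC_cons_succ 0 x []]
      simp only [sumsC_zero, sumsC_nil_succ, List.map_cons, List.map_nil, List.append_nil]
      rw [List.count_nil, Nat.zero_add]
      simpa using count_singleton_shift s (x + 0) x
    | succ k' =>
      rw [List.nil_append]
      rw [show sumsC (k' + 1 + 1) [x] = (sumsC (k' + 1) []).map (fun z => x + z) ++ sumsC (k' + 1 + 1) []
            from sumsC_cons_succ (k' + 1) x []]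
      simp [sumsC_nil_succ]
  | cons y t ih =>
    have hgoal : (y :: t) ++ [x] = y :: (t ++ [x]) := rfl
    rw [hgoal]
    rw [sumsC_cons_succ k y (t ++ [x]), sumsC_cons_succ k y t,
        List.count_append, List.count_append, count_map_add, count_map_add]
    cases k with
    | zero =>
      rw [ih s 0]
      simp only [sumsC_zero]
      omega
    | succ k' =>
      rw [ih (s - y) k', ih s (k' + 1), sumsC_cons_succ k' y t, List.count_append, count_map_add]
      have h3 : s - y - x = s - x - y := by ring
      rw [h3]
      omega

-- ===== A-side characterisation =====

theorem innerA_some (cs : List (List Int)) (seen : PySem.Set Int)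
    (h : (seen ++ cs.map List.sum).Nodup) :
    innerA cs seen = some (seen ++ cs.map List.sum) := by
  induction cs generalizing seen with
  | nil => simp [innerA]
  | cons c rest ih =>
    have h' := h
    rw [List.map_cons, List.nodup_append] at h'
    have hns : c.sum ∉ seen := fun hm => h'.2.2 c.sum hm c.sum (List.mem_cons_self) rfl
    have hc : ¬ (PySem.Set.contains seen c.sum = true) :=
      fun hct => hns ((PySem.Set.contains_iff seen c.sum).mp hct)
    rw [innerA]
    simp only [if_neg hc]
    rw [PySem.Set.add_of_not_mem hns]
    have hnodup2 : ((seen ++ [c.sum]) ++ rest.map List.sum).Nodup := by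
      have heq : (seen ++ [c.sum]) ++ rest.map List.sum = seen ++ (c.sum :: rest.map List.sum) := by simp
      rw [heq]
      rw [List.map_cons] at h
      exact h
    rw [ih _ hnodup2]
    simp

theorem innerA_none (cs : List (List Int)) (seen : PySem.Set Int)
    (hseen : seen.Nodup) (h : ¬ (seen ++ cs.map List.sum).Nodup) :
    innerA cs seen = none := by
  induction cs generalizing seen with
  | nil => exact absurd (by simpa using hseen) h
  | cons c rest ih =>
    rw [innerA]
    by_cases hm : c.sum ∈ seen
    · have hc : PySem.Set.contains seen c.sum = true := (PySem.Set.contains_iff seen c.sum).mpr hm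
      simp only [if_pos hc]
    · have hc : ¬ (PySem.Set.contains seen c.sum = true) :=
        fun hct => hm ((PySem.Set.contains_iff seen c.sum).mp hct)
      simp only [if_neg hc]
      rw [PySem.Set.add_of_not_mem hm]
      apply ih
      · exact List.Nodup.append hseen (List.nodup_singleton _) (by simpa using hm)
      · intro hn
        apply h
        rw [List.map_cons]
        simpa [List.append_assoc] using hn

theorem outerA_eq (l : List Int) (is : List Int) (seen : PySem.Set Int) (hseen : seen.Nodup) :
    outerA l is seen = decide (seen ++ is.flatMap (fun i => sumsC i.toNat l)).Nodup := by
  induction is generalizing seen with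
  | nil => simp [outerA, hseen]
  | cons i rest ih =>
    rw [List.flatMap_cons, ← List.append_assoc]
    by_cases h : (seen ++ (combosA i.toNat l).map List.sum).Nodup
    · rw [outerA, innerA_some _ _ h]
      exact ih _ h
    · rw [outerA, innerA_none _ _ hseen h]
      symm
      simp only [decide_eq_false_iff_not]
      intro hnd
      exact h ((List.sublist_append_left _ _).nodup hnd)

-- ===== B-side characterisation =====

-- a fold of "m[g s] = m.get(g s, 0) + c" over a pair list accumulates filtered sums
theorem foldl_insert_add_getD (ps : List (Int × Int)) (g : Int → Int) (d : PySem.Dict Int Int) (t : Int) :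
    (ps.foldl (fun m sc => m.insert (g sc.1) (m.getD (g sc.1) 0 + sc.2)) d).getD t 0
      = d.getD t 0 + ((ps.filter (fun sc => g sc.1 == t)).map (fun sc => sc.2)).sum := by
  induction ps generalizing d with
  | nil => simp
  | cons p ps ih =>
    rw [List.foldl_cons, ih]
    by_cases hp : g p.1 = t
    · rw [List.filter_cons_of_pos (by simp [hp])]
      rw [← hp, PySem.Dict.getD_insert_self]
      simp [add_assoc]
    · rw [List.filter_cons_of_neg (by simp [hp])]
      rw [PySem.Dict.getD_insert_of_ne _ _ _ (fun h => hp h.symm)]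

theorem filter_key_singleton (ps : List (Int × Int)) (h : (ps.map Prod.fst).Nodup) (a v : Int)
    (hm : (a, v) ∈ ps) : ps.filter (fun sc => sc.1 == a) = [(a, v)] := by
  induction ps with
  | nil => cases hm
  | cons p ps ih =>
    rw [List.map_cons, List.nodup_cons] at h
    cases hm with
    | head =>
      rw [List.filter_cons_of_pos (by simp)]
      have hnil : ps.filter (fun sc => sc.1 == (a : Int)) = [] := by
        rw [List.filter_eq_nil_iff]
        intro sc hsc
        simp only [beq_iff_eq]
        intro he
        apply h.1
        show (a : Int) ∈ ps.map Prod.fst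
        rw [← he]
        exact List.mem_map_of_mem hsc
      rw [hnil]
    | tail _ hm' =>
      have hpa : p.1 ≠ a := fun he =>
        h.1 (he ▸ (List.mem_map_of_mem hm' : (a, v).1 ∈ ps.map Prod.fst))
      rw [List.filter_cons_of_neg (by simp [hpa]), ih h.2 hm']

theorem items_filter_sum (d : PySem.Dict Int Int) (hd : d.keys.Nodup) (a : Int) :
    ((d.items.filter (fun sc => sc.1 == a)).map (fun sc => sc.2)).sum = d.getD a 0 := by
  have hkeys : (d.items.map Prod.fst).Nodup := hd
  cases hc : d.get? a with
  | some v =>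
    rw [filter_key_singleton d.items hkeys a v (PySem.Dict.mem_items_of_get?_eq_some d hc)]
    rw [PySem.Dict.getD_of_get?_eq_some d 0 hc]
    simp
  | none =>
    have hnk : a ∉ d.items.map Prod.fst := by
      have := (PySem.Dict.get?_eq_none_iff_not_mem_keys d a).mp hc
      simpa [PySem.Dict.keys] using this
    have hnil : d.items.filter (fun sc => sc.1 == a) = [] := by
      rw [List.filter_eq_nil_iff]
      intro sc hsc
      simp only [beq_iff_eq]
      intro he
      apply hnk
      show (a : Int) ∈ d.items.map Prod.fst
      rw [← he]
      exact List.mem_map_of_mem hsc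
    rw [hnil, PySem.Dict.getD_of_get?_eq_none d 0 hc]
    simp

theorem mergeB_getD (prev cur : PySem.Dict Int Int) (x t : Int) (hp : prev.keys.Nodup) :
    (mergeB prev cur x).getD t 0 = cur.getD t 0 + prev.getD (t - x) 0 := by
  rw [mergeB, foldl_insert_add_getD prev.items (fun a => a + x) cur t]
  congr 1
  have hfc : prev.items.filter (fun sc => sc.1 + x == t) = prev.items.filter (fun sc => sc.1 == t - x) := by
    apply List.filter_congr
    intro sc _
    rcases eq_or_ne (sc.1 + x) t with hsc | hsc
    · simp [show sc.1 = t - x from by omega]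
    · simp [hsc, show sc.1 ≠ t - x from by omega]
  rw [hfc, items_filter_sum prev hp]

theorem mergeB_keys_nodup (prev cur : PySem.Dict Int Int) (x : Int) (hc : cur.keys.Nodup) :
    (mergeB prev cur x).keys.Nodup := by
  rw [mergeB]
  exact PySem.Dict.nodup_keys_foldl_insert_key prev.items (fun sc => sc.1 + x)
    (fun m sc => m.getD (sc.1 + x) 0 + sc.2) cur hc

def dp0 (h : Nat) : List (PySem.Dict Int Int) :=
  (PySem.Dict.empty.insert 0 1) :: List.replicate h PySem.Dict.empty

theorem dp_spec (half : Nat) (l : List Int) :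
    (l.foldl stepB (dp0 half)).length = half + 1 ∧
    ∀ k : Nat, k ≤ half →
      ((l.foldl stepB (dp0 half)).getD k PySem.Dict.empty).keys.Nodup ∧
      ∀ s : Int, ((l.foldl stepB (dp0 half)).getD k PySem.Dict.empty).getD s 0
          = ((sumsC k l).count s : Int) := by
  induction l using List.reverseRecOn with
  | nil =>
    refine ⟨by simp [dp0], fun k hk => ?_⟩
    cases k with
    | zero =>
      refine ⟨by rw [List.foldl_nil, dp0, List.getD_cons_zero]; decide, fun s => ?_⟩
      rw [List.foldl_nil, dp0, List.getD_cons_zero, sumsC_zero]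
      by_cases hs : s = 0
      · simp [hs, PySem.Dict.getD_insert_self]
      · rw [PySem.Dict.getD_insert_of_ne _ _ _ hs, PySem.Dict.getD_empty,
            List.count_eq_zero_of_not_mem (by simp [hs])]
        simp
    | succ k' =>
      have hget : (dp0 half).getD (k' + 1) PySem.Dict.empty = PySem.Dict.empty := by
        rcases Nat.lt_or_ge k' half with hlt | hge
        · rw [dp0, List.getD_cons_succ, List.getD_eq_getElem _ _ (by simpa using hlt)]
          simp
        · rw [dp0, List.getD_cons_succ, List.getD_eq_default _ _ (by simpa using hge)]
      rw [List.foldl_nil]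
      refine ⟨by rw [hget]; decide, fun s => ?_⟩
      rw [hget, sumsC_nil_succ, PySem.Dict.getD_empty]
      simp
  | append_singleton l x ih =>
    obtain ⟨hlen, hinv⟩ := ih
    rw [List.foldl_append, List.foldl_cons, List.foldl_nil]
    set dp := l.foldl stepB (dp0 half) with hdp
    obtain ⟨d0, rest, hd0⟩ : ∃ d0 rest, dp = d0 :: rest := by
      cases hdpc : dp with
      | nil => rw [hdpc] at hlen; simp at hlen
      | cons a b => exact ⟨a, b, rfl⟩
    have hstep : stepB dp x = d0 :: ((dp.zip dp.tail).map (fun pc => mergeB pc.1 pc.2 x)) := by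
      rw [hd0]; rfl
    have hziplen : (dp.zip dp.tail).length = half := by
      rw [List.length_zip, List.length_tail, hlen]
      omega
    refine ⟨by rw [hstep]; simp [hziplen], fun k hk => ?_⟩
    cases k with
    | zero =>
      rw [hstep, List.getD_cons_zero]
      have h0 := hinv 0 (Nat.zero_le _)
      rw [hd0, List.getD_cons_zero] at h0
      refine ⟨h0.1, fun s => ?_⟩
      rw [h0.2 s, sumsC_zero l, sumsC_zero (l ++ [x])]
    | succ k' =>
      have hklt : k' < (dp.zip dp.tail).length := by omega
      have hget : (stepB dp x).getD (k' + 1) PySem.Dict.empty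
          = mergeB (dp.getD k' PySem.Dict.empty) (dp.getD (k' + 1) PySem.Dict.empty) x := by
        rw [hstep, List.getD_cons_succ,
            List.getD_eq_getElem _ _ (by simpa using hklt), List.getElem_map, List.getElem_zip]
        have h1 : k' < dp.length := by omega
        have h2 : k' + 1 < dp.length := by omega
        rw [List.getD_eq_getElem _ _ h1, List.getD_eq_getElem _ _ h2]
        dsimp only
        rw [List.getElem_tail]
      rw [hget]
      have hprev := hinv k' (by omega)
      have hcur := hinv (k' + 1) (by omega)
      refine ⟨mergeB_keys_nodup _ _ _ hcur.1, fun s => ?_⟩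
      rw [mergeB_getD _ _ _ _ hprev.1, hcur.2 s, hprev.2 (s - x), count_sumsC_append]
      push_cast
      ring

-- the aggregation loop over the tables of sizes 1..half
theorem counts_getD (ts : List (PySem.Dict Int Int)) (acc : PySem.Dict Int Int)
    (h : ∀ t ∈ ts, t.keys.Nodup) (s : Int) :
    (ts.foldl (fun acc t => t.items.foldl (fun a sc => a.insert sc.1 (a.getD sc.1 0 + sc.2)) acc) acc).getD s 0
      = acc.getD s 0 + (ts.map (fun t => t.getD s 0)).sum := by
  induction ts generalizing acc with
  | nil => simp
  | cons t ts ih =>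
    rw [List.foldl_cons, ih _ (fun u hu => h u (by simp [hu]))]
    have hinner : (t.items.foldl (fun a sc => a.insert sc.1 (a.getD sc.1 0 + sc.2)) acc).getD s 0
        = acc.getD s 0 + t.getD s 0 := by
      have hgen := foldl_insert_add_getD t.items (fun a => a) acc s
      simp only [] at hgen
      rw [hgen, items_filter_sum t (h t (by simp)) s]
    rw [hinner]
    simp [add_assoc]

theorem counts_keys_nodup (ts : List (PySem.Dict Int Int)) (acc : PySem.Dict Int Int)
    (h : acc.keys.Nodup) :
    (ts.foldl (fun acc t => t.items.foldl (fun a sc => a.insert sc.1 (a.getD sc.1 0 + sc.2)) acc) acc).keys.Nodup := by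
  induction ts generalizing acc with
  | nil => exact h
  | cons t ts ih =>
    rw [List.foldl_cons]
    exact ih _ (PySem.Dict.nodup_keys_foldl_insert_key t.items (fun sc => sc.1)
      (fun a sc => a.getD sc.1 0 + sc.2) acc h)

theorem any_values_iff (d : PySem.Dict Int Int) (hd : d.keys.Nodup) :
    (d.values.any (fun c => c > 1)) = true ↔ ∃ s, d.getD s 0 > 1 := by
  rw [PySem.Dict.values_eq_map_keys d hd 0]
  simp only [List.any_eq_true, List.mem_map, decide_eq_true_eq]
  constructor
  · rintro ⟨c, ⟨k, hk, rfl⟩, hc⟩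
    exact ⟨k, hc⟩
  · rintro ⟨s, hs⟩
    have hmem : s ∈ d.keys := by
      by_contra hnm
      have hcf : d.contains s = false := by
        cases hcc : d.contains s with
        | false => rfl
        | true => exact absurd ((PySem.Dict.contains_iff_mem_keys d s).mp hcc) hnm
      rw [PySem.Dict.getD_of_not_contains d 0 hcf] at hs
      omega
    exact ⟨d.getD s 0, ⟨s, hmem, rfl⟩, hs⟩

theorem count_flatMap (is : List Nat) (f : Nat → List Int) (s : Int) :
    (is.flatMap f).count s = (is.map (fun i => (f i).count s)).sum := by
  induction is with
  | nil => simp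
  | cons i rest ih => simp [List.flatMap_cons, List.count_append, ih]

theorem map_eq_range_getD {α β : Type} (ts : List α) (d : α) (f : α → β) :
    ts.map f = (List.range ts.length).map (fun k => f (ts.getD k d)) := by
  induction ts with
  | nil => simp
  | cons t ts ih =>
    conv_rhs => rw [show (t :: ts).length = ts.length + 1 from rfl, List.range_succ_eq_map,
      List.map_cons, List.map_map]
    rw [List.map_cons]
    congr 1

-- the two else-branches agree for every pool l and every bound c = check_up_to ≥ 0
theorem core_eq (l : List Int) (c : Int) (hc : 0 ≤ c) :
    outerA l (PySem.List.pyRange 1 (c + 1) 1) PySem.Set.empty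
      = !(((l.foldl stepB ((PySem.Dict.empty.insert 0 1) :: List.replicate c.toNat PySem.Dict.empty)).tail.foldl
            (fun acc t => t.items.foldl (fun a sc => a.insert sc.1 (a.getD sc.1 0 + sc.2)) acc)
            PySem.Dict.empty).values.any (fun v => v > 1)) := by
  set half := c.toNat with hhalf
  have hdp0 : (PySem.Dict.empty.insert (0:Int) (1:Int)) :: List.replicate half PySem.Dict.empty = dp0 half := rfl
  rw [hdp0]
  -- the multiset of checked sums, indexed over sizes 1..half
  set flat := (List.range half).flatMap (fun k => sumsC (k + 1) l) with hflat
  -- A-side: the early-exit loops succeed exactly when flat has no duplicate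
  have hA : outerA l (PySem.List.pyRange 1 (c + 1) 1) PySem.Set.empty = decide flat.Nodup := by
    rw [outerA_eq l (PySem.List.pyRange 1 (c + 1) 1) PySem.Set.empty List.nodup_nil]
    have h1 : (PySem.List.pyRange 1 (c + 1) 1).flatMap (fun i => sumsC i.toNat l) = flat := by
      rw [PySem.List.pyRange_one, List.flatMap_map,
          show (c + 1 - 1).toNat = half from by omega, hflat]
      congr 1
      funext k
      change sumsC (1 + (k : Int)).toNat l = sumsC (k + 1) l
      congr 1
      omega
    rw [show (PySem.Set.empty : PySem.Set Int) = ([] : List Int) from rfl, List.nil_append, h1]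
  rw [hA]
  -- B-side: the DP tables carry the multiplicity of every sum in flat
  obtain ⟨hlen, hinv⟩ := dp_spec half l
  set dpl := l.foldl stepB (dp0 half) with hdpl
  obtain ⟨d0, rest, hd0⟩ : ∃ d0 rest, dpl = d0 :: rest := by
    cases hdpc : dpl with
    | nil => rw [hdpc] at hlen; simp at hlen
    | cons a b => exact ⟨a, b, rfl⟩
  have hrestlen : rest.length = half := by
    rw [hd0] at hlen
    simpa using hlen
  have hrestget : ∀ k : Nat, k < half → rest.getD k PySem.Dict.empty = dpl.getD (k + 1) PySem.Dict.empty := by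
    intro k hk
    rw [hd0, List.getD_cons_succ]
  have htail : dpl.tail = rest := by rw [hd0]; rfl
  have hrest_nodup : ∀ t ∈ rest, t.keys.Nodup := by
    intro t ht
    obtain ⟨k, hk, rfl⟩ := List.getElem_of_mem ht
    rw [← List.getD_eq_getElem _ PySem.Dict.empty hk, hrestget k (by omega)]
    exact (hinv (k + 1) (by omega)).1
  set counts := rest.foldl
      (fun acc t => t.items.foldl (fun a sc => a.insert sc.1 (a.getD sc.1 0 + sc.2)) acc)
      PySem.Dict.empty with hcountsdef
  have hkey : ∀ s : Int, counts.getD s 0 = ((flat.count s : Nat) : Int) := by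
    intro s
    rw [hcountsdef, counts_getD rest PySem.Dict.empty hrest_nodup s, PySem.Dict.getD_empty]
    rw [map_eq_range_getD rest PySem.Dict.empty (fun t => t.getD s 0), hrestlen]
    rw [hflat, count_flatMap, Nat.cast_list_sum, List.map_map]
    simp only [zero_add]
    congr 1
    apply List.map_congr_left
    intro k hk
    rw [List.mem_range] at hk
    simp only [Function.comp]
    rw [hrestget k hk, (hinv (k + 1) (by omega)).2 s]
  have hcnodup : counts.keys.Nodup := by
    rw [hcountsdef]
    exact counts_keys_nodup rest PySem.Dict.empty (by simp [PySem.Dict.keys, PySem.Dict.empty])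
  rw [htail, ← hcountsdef]
  -- both sides decide "no sum occurs twice in flat"
  cases hAny : counts.values.any (fun v => v > 1) with
  | true =>
    obtain ⟨s, hs⟩ := (any_values_iff counts hcnodup).mp hAny
    rw [hkey s] at hs
    simp only [Bool.not_true, decide_eq_false_iff_not]
    intro hnd
    have := List.nodup_iff_count_le_one.mp hnd s
    omega
  | false =>
    simp only [Bool.not_false, decide_eq_true_eq]
    rw [List.nodup_iff_count_le_one]
    intro s
    by_contra hgt
    have hs : counts.getD s 0 > 1 := by
      rw [hkey s]
      omega
    have := (any_values_iff counts hcnodup).mpr ⟨s, hs⟩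
    rw [hAny] at this
    cases this

-- ===== VERDICT (by name: the statement is the Claim_ definition above) =====
theorem itertools_sum_check_spec : Claim_equal_itertools_sum_check := by
  intro list_1 _hdom
  unfold Spec_itertools_sum_check itertools_sum_check itertools_sum_check_alt
  set l := PySem.List.sorted list_1 (fun x => x) false with hl
  simp only []
  split_ifs with h1 h2
  · rfl
  · rfl
  · apply core_eq
    rw [PySem.Int.floordiv_eq_ediv_of_pos (by omega)]
    have : (0:Int) ≤ PySem.List.len l := by simp [PySem.List.len_eq]
    exact Int.ediv_nonneg this (by norm_num)
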